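-- pv_equiv track=rewrite | github.com/Tanushree200/Derma-Match | skincare_recommendation.py | generate_skincare_routine
-- ===== SOURCE A (Python) =====
-- skincare_ingredient_forms = {
--     "Hyaluronic acid": "serum",
--     "Vitamin C": "serum",
--     "Niacinamide": "serum",
--     "Retinol": "serum",
--     "Ceramides": "moisturizer",
--     "Squalane": "moisturizer",
--     "Salicylic acid": "cleanser",
--     "Glycolic acid": "toner",
--     "Tea tree oil": "spot treatment",
--     "Centella asiatica": "moisturizer",
--     "Peptides": "serum",
--     "Kojic acid": "serum",
--     "Cica": "moisturizer",
--     "AHA (Alpha Hydroxy Acid)":"serum",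
--     "Zinc oxide":"moisturizer",
--     "Lactic acid":"serum",
--     "Benzoyl Peroxide":"spot treatment",
-- }
--
-- def generate_skincare_routine(recommendations):
--     skincare_routine = {}
--
--     # Iterate through the recommendations dictionary
--     for skin_type, ingredients in recommendations.items():
--         for ingredient in ingredients:
--             # Get the form of the ingredient
--             form = skincare_ingredient_forms.get(ingredient, "unknown")
--
--             # Check if the form already exists in the routine
--             if form in skincare_routine:
--                 # If the ingredient isn't already in the list, append it
--                 if ingredient not in skincare_routine[form]:
--                     skincare_routine[form].append(ingredient)
--             else:
--                 # If the form isn't in the routine, create a new entry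
--                 skincare_routine[form] = [ingredient]
--
--     return skincare_routine
-- ===== SOURCE B (Python) =====
-- skincare_ingredient_forms = {
--     "Hyaluronic acid": "serum",
--     "Vitamin C": "serum",
--     "Niacinamide": "serum",
--     "Retinol": "serum",
--     "Ceramides": "moisturizer",
--     "Squalane": "moisturizer",
--     "Salicylic acid": "cleanser",
--     "Glycolic acid": "toner",
--     "Tea tree oil": "spot treatment",
--     "Centella asiatica": "moisturizer",
--     "Peptides": "serum",
--     "Kojic acid": "serum",
--     "Cica": "moisturizer",
--     "AHA (Alpha Hydroxy Acid)":"serum",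
--     "Zinc oxide":"moisturizer",
--     "Lactic acid":"serum",
--     "Benzoyl Peroxide":"spot treatment",
-- }
--
-- def generate_skincare_routine(recommendations):
--     # Grouping by repeated filtering, with no accumulator dict at all:
--     # 1) deduplicate the flattened ingredient stream (first occurrences, in order);
--     # 2) the output's key order is the first-occurrence order of the forms;
--     # 3) each bucket is a filter of the deduped stream for that form.
--     deduped = list(dict.fromkeys(i for ings in recommendations.values() for i in ings))
--     forms = list(dict.fromkeys(skincare_ingredient_forms.get(i, "unknown") for i in deduped))
--     return {f: [i for i in deduped
--                 if skincare_ingredient_forms.get(i, "unknown") == f]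
--             for f in forms}
-- ===== Notes on version B (the rewrite author's own statement) =====
-- stated objective: faster
-- what changed: B builds no grouping dict at all: it deduplicates the flattened ingredient stream once (dict.fromkeys), derives the output key order as the deduped list of forms, and produces each bucket by filtering the deduped stream per form (a dict comprehension of per-form filters), replacing A's interleaved check-membership-while-appending accumulation.
import Mathlib
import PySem

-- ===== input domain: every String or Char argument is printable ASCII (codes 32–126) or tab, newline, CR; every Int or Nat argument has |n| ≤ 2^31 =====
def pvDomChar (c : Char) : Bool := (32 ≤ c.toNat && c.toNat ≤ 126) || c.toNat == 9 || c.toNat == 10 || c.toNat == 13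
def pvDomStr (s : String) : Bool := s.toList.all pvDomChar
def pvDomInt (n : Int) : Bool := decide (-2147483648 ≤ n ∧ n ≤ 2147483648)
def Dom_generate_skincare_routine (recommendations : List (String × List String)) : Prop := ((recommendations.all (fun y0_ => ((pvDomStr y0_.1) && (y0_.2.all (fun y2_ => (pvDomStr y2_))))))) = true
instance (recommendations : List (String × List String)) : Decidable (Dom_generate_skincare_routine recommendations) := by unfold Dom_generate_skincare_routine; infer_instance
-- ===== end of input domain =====

-- B builds no grouping dict at all: it deduplicates the flattened ingredient stream once,
-- lists the forms in first-occurrence order, and produces each bucket by filtering that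
-- deduped stream per form (alternative decomposition; same asymptotic cost up to the
-- constant number of forms).

-- the module-level constant table
def skincare_ingredient_forms : PySem.Dict String String := PySem.Dict.ofList [
  ("Hyaluronic acid", "serum"),
  ("Vitamin C", "serum"),
  ("Niacinamide", "serum"),
  ("Retinol", "serum"),
  ("Ceramides", "moisturizer"),
  ("Squalane", "moisturizer"),
  ("Salicylic acid", "cleanser"),
  ("Glycolic acid", "toner"),
  ("Tea tree oil", "spot treatment"),
  ("Centella asiatica", "moisturizer"),
  ("Peptides", "serum"),
  ("Kojic acid", "serum"),
  ("Cica", "moisturizer"),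
  ("AHA (Alpha Hydroxy Acid)", "serum"),
  ("Zinc oxide", "moisturizer"),
  ("Lactic acid", "serum"),
  ("Benzoyl Peroxide", "spot treatment")]

-- ===== PORT A =====
-- body of A's inner loop: get the form, then check/extend the routine dict
def stepA (d : PySem.Dict String (List String)) (ingredient : String) : PySem.Dict String (List String) :=
  let form := skincare_ingredient_forms.getD ingredient "unknown"
  if d.contains form then
    if ingredient ∈ d.getD form [] then d
    else d.insert form (d.getD form [] ++ [ingredient])
  else d.insert form [ingredient]

def generate_skincare_routine (recommendations : List (String × List String)) : List (String × List String) :=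
  (recommendations.foldl
    (fun d p => p.2.foldl stepA d)
    PySem.Dict.empty).items

-- ===== PORT B =====
def generate_skincare_routine_alt (recommendations : List (String × List String)) : List (String × List String) :=
  -- deduped = list(dict.fromkeys(flattened ingredients))
  let deduped := PySem.List.dedup (recommendations.flatMap (fun p => p.2))
  -- forms = list(dict.fromkeys(form of each deduped ingredient))
  let forms := PySem.List.dedup (deduped.map (fun i => skincare_ingredient_forms.getD i "unknown"))
  -- {f: [i for i in deduped if form(i) == f] for f in forms}
  forms.map (fun f => (f, deduped.filter (fun i => skincare_ingredient_forms.getD i "unknown" == f)))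

-- ===== PRECONDITION & SPEC =====
def Spec_generate_skincare_routine (recommendations : List (String × List String)) (out : List (String × List String)) : Prop := out = generate_skincare_routine_alt recommendations
instance (recommendations : List (String × List String)) (out : List (String × List String)) : Decidable (Spec_generate_skincare_routine recommendations out) := by unfold Spec_generate_skincare_routine; infer_instance

-- ===== CLAIM =====
def Claim_equal_generate_skincare_routine : Prop := ∀ (recommendations : List (String × List String)), Dom_generate_skincare_routine recommendations → Spec_generate_skincare_routine recommendations (generate_skincare_routine recommendations)

-- ===== LEMMAS AND PROOFS =====

-- form of an ingredient (a pure function of the ingredient; the crux of the equivalence)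
def formOf (ingredient : String) : String := skincare_ingredient_forms.getD ingredient "unknown"

-- proof-only intermediate: the plain grouping step (modify-append), used to bridge the two ports
def stepB (d : PySem.Dict String (List String)) (ingredient : String) : PySem.Dict String (List String) :=
  d.modify (formOf ingredient) [] (· ++ [ingredient])

-- "already grouped": x sits in the list stored at its own form
def memD (d : PySem.Dict String (List String)) (x : String) : Prop := x ∈ d.getD (formOf x) []

lemma stepB_eq (d : PySem.Dict String (List String)) (x : String) :
    stepB d x = d.insert (formOf x) (d.getD (formOf x) [] ++ [x]) := rfl

lemma stepA_eq (d : PySem.Dict String (List String)) (x : String) :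
    stepA d x = if x ∈ d.getD (formOf x) [] then d else stepB d x := by
  simp only [stepA, stepB_eq, formOf]
  by_cases hc : d.contains (skincare_ingredient_forms.getD x "unknown") = true
  · simp [hc]
  · have hc' : d.contains (skincare_ingredient_forms.getD x "unknown") = false := by
      simpa using hc
    simp [hc', PySem.Dict.getD_of_not_contains d _ hc']

lemma memD_stepB (d : PySem.Dict String (List String)) (x y : String) :
    memD (stepB d x) y ↔ memD d y ∨ y = x := by
  simp only [memD, stepB_eq, PySem.Dict.getD_insert]
  by_cases h : formOf y = formOf x
  · simp [h, List.mem_append, or_comm]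
  · have : y ≠ x := fun he => h (he ▸ rfl)
    simp [h, this]

-- the residue of the global dedup: first occurrences of L not already in the seen-list s
def ddAux (s : List String) : List String → List String
  | [] => []
  | x :: xs => if x ∈ s then ddAux s xs else x :: ddAux (s ++ [x]) xs

lemma update_eq_ddAux (L s : List String) :
    PySem.Set.update s L = s ++ ddAux s L := by
  induction L generalizing s with
  | nil => simp [PySem.Set.update, ddAux]
  | cons x xs ih =>
    have hstep : PySem.Set.update s (x :: xs) = PySem.Set.update (PySem.Set.add s x) xs := rfl
    by_cases h : x ∈ s
    · have ha : PySem.Set.add s x = s := by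
        simp [PySem.Set.add, PySem.Set.contains, List.contains_eq_mem, h]
      rw [hstep, ha, ih s, ddAux, if_pos h]
    · have ha : PySem.Set.add s x = s ++ [x] := by
        simp [PySem.Set.add, PySem.Set.contains, List.contains_eq_mem, h]
      rw [hstep, ha, ih (s ++ [x]), ddAux, if_neg h, List.append_assoc]
      rfl

lemma dedup_eq_ddAux (L : List String) : PySem.List.dedup L = ddAux [] L := by
  simpa [PySem.List.dedup, PySem.Set.ofList, PySem.Set.empty]
    using update_eq_ddAux L ([] : List String)

-- main invariant: folding A's interleaved step over L equals folding the plain grouping step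
-- over the deduplicated residue, provided d already holds exactly the ingredients in s
lemma fold_key (L : List String) (d : PySem.Dict String (List String)) (s : List String)
    (hinv : ∀ x, memD d x ↔ x ∈ s) :
    L.foldl stepA d = (ddAux s L).foldl stepB d := by
  induction L generalizing d s with
  | nil => simp [ddAux]
  | cons x xs ih =>
    have hmem : (x ∈ d.getD (formOf x) []) ↔ x ∈ s := hinv x
    rw [List.foldl_cons, stepA_eq, ddAux]
    by_cases h : x ∈ s
    · rw [if_pos (hmem.2 h), if_pos h]
      exact ih d s hinv
    · rw [if_neg (fun hm => h (hmem.1 hm)), if_neg h, List.foldl_cons]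
      exact ih (stepB d x) (s ++ [x]) (fun y => by rw [memD_stepB]; simp [hinv y])

lemma flatten_fold (recommendations : List (String × List String))
    (d : PySem.Dict String (List String)) :
    recommendations.foldl (fun d p => p.2.foldl stepA d) d
      = (recommendations.flatMap (fun p => p.2)).foldl stepA d := by
  induction recommendations generalizing d with
  | nil => simp
  | cons p ps ih => simp [List.foldl_append, ih]

-- the grouping fold as a fold over (form, ingredient) pairs, to cite the library grouping lemmas
lemma foldl_stepB_eq_pairs (L : List String) (d : PySem.Dict String (List String)) :
    L.foldl stepB d
      = (L.map (fun x => (formOf x, x))).foldl (fun d p => d.modify p.1 [] (· ++ [p.2])) d := by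
  rw [List.foldl_map]; rfl

-- items of the grouping fold = B's map-of-filters
lemma items_foldl_stepB (L : List String) :
    (L.foldl stepB PySem.Dict.empty).items
      = (PySem.List.dedup (L.map formOf)).map
          (fun f => (f, L.filter (fun i => formOf i == f))) := by
  have hkeys : (L.foldl stepB PySem.Dict.empty).keys = PySem.List.dedup (L.map formOf) := by
    rw [foldl_stepB_eq_pairs]
    rw [PySem.Dict.keys_foldl_modify_key]
    simp [PySem.Set.ofList, PySem.Set.update, PySem.List.dedup_eq_ofList, List.map_map, Function.comp_def]
  have hnodup : (L.foldl stepB PySem.Dict.empty).keys.Nodup := by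
    rw [hkeys]; exact PySem.List.nodup_dedup _
  have hgetD : ∀ f, (L.foldl stepB PySem.Dict.empty).getD f []
      = L.filter (fun i => formOf i == f) := by
    intro f
    rw [foldl_stepB_eq_pairs, PySem.Dict.getD_foldl_modify_append]
    simp [PySem.Dict.getD_empty, List.filter_map, Function.comp_def]
  rw [PySem.Dict.items_eq_map_keys _ hnodup [], hkeys]
  exact List.map_congr_left (fun f _ => by rw [hgetD f])

-- ===== VERDICT =====
theorem generate_skincare_routine_spec : Claim_equal_generate_skincare_routine := by
  intro recommendations _
  unfold Spec_generate_skincare_routine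
  unfold generate_skincare_routine generate_skincare_routine_alt
  dsimp only
  rw [flatten_fold, dedup_eq_ddAux,
    fold_key _ PySem.Dict.empty [] (fun x => by simp [memD, PySem.Dict.getD_empty]),
    ← dedup_eq_ddAux, items_foldl_stepB]
  rfl
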